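-- pv_equiv track=rewrite | github.com/jennyzzt/LLM_debate_on_ARC | ARC_gen_agents2_rounds3_openai/6e82a1ae/agent0/algo0.py | solve
-- ===== SOURCE A (Python) =====
-- def solve(input_grid):
--     # Initialize the output grid with zeros, matching the size of the input grid
--     output_grid = [[0 for _ in range(len(input_grid[0]))] for _ in range(len(input_grid))]
--
--     # Helper function to check if a cell contains a 5 and is within the grid bounds
--     def is_five(x, y):
--         return 0 <= x < len(input_grid) and 0 <= y < len(input_grid[0]) and input_grid[x][y] == 5
--
--     # Iterate through each cell in the input grid
--     for i in range(len(input_grid)):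
--         for j in range(len(input_grid[0])):
--             # If the current cell is a 5, determine its transformation
--             if input_grid[i][j] == 5:
--                 # Check for different configurations of 5s and transform accordingly
--                 if is_five(i+1, j) and is_five(i, j+1) and is_five(i+1, j+1):
--                     output_grid[i][j] = 4
--                 elif is_five(i+1, j):
--                     output_grid[i][j] = 3
--                 elif is_five(i, j+1):
--                     output_grid[i][j] = 2
--                 else:
--                     output_grid[i][j] = 1
--                 # Correct potential overwrites in 2x2 squares
--                 if is_five(i-1, j) and is_five(i, j-1) and is_five(i-1, j-1):
--                     output_grid[i][j] = 4
--
--     return output_grid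
-- ===== SOURCE B (Python) =====
-- def solve(input_grid):
--     rows = len(input_grid)
--     width = len(input_grid[0]) if input_grid else 0
--     # First pass: mark both diagonal corners of every 2x2 block of 5s.
--     four = set()
--     for i in range(rows - 1):
--         for j in range(width - 1):
--             if (input_grid[i][j] == 5 and input_grid[i + 1][j] == 5
--                     and input_grid[i][j + 1] == 5 and input_grid[i + 1][j + 1] == 5):
--                 four.add((i, j))
--                 four.add((i + 1, j + 1))
--     # Second pass: code every remaining 5 by its neighbour below / to the right.
--     def code(i, j):
--         if input_grid[i][j] != 5:
--             return 0
--         if (i, j) in four: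
--             return 4
--         if i + 1 < rows and input_grid[i + 1][j] == 5:
--             return 3
--         if j + 1 < width and input_grid[i][j + 1] == 5:
--             return 2
--         return 1
--     return [[code(i, j) for j in range(width)] for i in range(rows)]
-- ===== Notes on version B (the rewrite author's own statement) =====
-- stated objective: alternative
-- what changed: Replaces A's single pass with per-cell forward-block check plus a corrective backward-block overwrite by a two-pass scheme: a first pass over 2x2 blocks collects both diagonal corners of every all-5 block into a set, and a second pass builds the output grid directly, coding remaining 5s by their below/right neighbours.
import Mathlib
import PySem

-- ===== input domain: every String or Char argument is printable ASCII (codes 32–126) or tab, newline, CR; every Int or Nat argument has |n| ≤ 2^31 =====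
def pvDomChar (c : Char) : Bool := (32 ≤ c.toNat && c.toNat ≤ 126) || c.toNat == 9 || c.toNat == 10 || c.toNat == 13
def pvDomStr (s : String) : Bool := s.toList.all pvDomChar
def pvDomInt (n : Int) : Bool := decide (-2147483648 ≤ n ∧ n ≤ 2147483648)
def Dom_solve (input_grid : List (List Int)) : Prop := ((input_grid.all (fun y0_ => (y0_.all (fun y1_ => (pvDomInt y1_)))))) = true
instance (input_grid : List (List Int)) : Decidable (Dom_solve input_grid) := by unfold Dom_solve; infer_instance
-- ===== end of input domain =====

-- B replaces A's per-cell forward-check-plus-backward-overwrite single pass by a two-pass scheme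
-- (collect 2x2 all-5 block corners into a set, then code the grid directly): alternative decomposition, same cost.


-- ===== PORT A =====
-- input_grid[i][j] (only reached in-bounds under Pre_solve) is ported as getD with default.
def cellA (g : List (List Int)) (i j : Nat) : Int := (g.getD i []).getD j 0

def isFiveA (g : List (List Int)) (x y : Int) : Bool :=
  decide (0 ≤ x) && decide (x < (g.length : Int)) &&
  decide (0 ≤ y) && decide (y < ((g.headD []).length : Int)) &&
  ((g.getD x.toNat []).getD y.toNat 0 == 5)

def setCellA (out : List (List Int)) (i j : Nat) (v : Int) : List (List Int) :=
  out.set i ((out.getD i []).set j v)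

def bodyA (g : List (List Int)) (i : Nat) (out : List (List Int)) (j : Nat) : List (List Int) :=
  if cellA g i j == 5 then
    let v : Int :=
      if isFiveA g ((i : Int)+1) (j : Int) && isFiveA g (i : Int) ((j : Int)+1) && isFiveA g ((i : Int)+1) ((j : Int)+1) then 4
      else if isFiveA g ((i : Int)+1) (j : Int) then 3
      else if isFiveA g (i : Int) ((j : Int)+1) then 2
      else 1
    let out1 := setCellA out i j v
    if isFiveA g ((i : Int)-1) (j : Int) && isFiveA g (i : Int) ((j : Int)-1) && isFiveA g ((i : Int)-1) ((j : Int)-1) then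
      setCellA out1 i j 4
    else out1
  else out

def solve (input_grid : List (List Int)) : List (List Int) :=
  let rows := input_grid.length
  let w := (input_grid.headD []).length
  let init := (List.range rows).map (fun _ => (List.range w).map (fun _ => (0 : Int)))
  (List.range rows).foldl (fun out i => (List.range w).foldl (bodyA input_grid i) out) init

-- ===== PORT B =====
def blockB (g : List (List Int)) (i j : Nat) : Bool :=
  (cellA g i j == 5) && (cellA g (i+1) j == 5) && (cellA g i (j+1) == 5) && (cellA g (i+1) (j+1) == 5)

def addBlock (g : List (List Int)) (i : Nat) (s : PySem.Set (Nat × Nat)) (j : Nat) : PySem.Set (Nat × Nat) :=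
  if blockB g i j then PySem.Set.add (PySem.Set.add s (i, j)) (i+1, j+1) else s

def fourB (g : List (List Int)) : PySem.Set (Nat × Nat) :=
  (List.range (g.length - 1)).foldl
    (fun s i => (List.range ((g.headD []).length - 1)).foldl (addBlock g i) s)
    PySem.Set.empty

def codeB (g : List (List Int)) (four : PySem.Set (Nat × Nat)) (i j : Nat) : Int :=
  if !(cellA g i j == 5) then 0
  else if PySem.Set.contains four (i, j) then 4
  else if decide (i+1 < g.length) && (cellA g (i+1) j == 5) then 3
  else if decide (j+1 < (g.headD []).length) && (cellA g i (j+1) == 5) then 2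
  else 1

def solve_alt (input_grid : List (List Int)) : List (List Int) :=
  let four := fourB input_grid
  (List.range input_grid.length).map (fun i =>
    (List.range (input_grid.headD []).length).map (fun j => codeB input_grid four i j))

-- ===== PRECONDITION & SPEC =====
-- Pre_ excludes exactly the inputs where Python A raises IndexError: grids with a
-- row shorter than row 0 (input_grid[i][j]).
def Pre_solve (input_grid : List (List Int)) : Prop :=
  ∀ row ∈ input_grid, (input_grid.headD []).length ≤ row.length
instance (input_grid : List (List Int)) : Decidable (Pre_solve input_grid) := by unfold Pre_solve; infer_instance

def pvWitness_solve : List (List Int) := [[5, 5, 0], [5, 5, 5], [0, 5, 0]]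

def Spec_solve (input_grid : List (List Int)) (out : List (List Int)) : Prop := out = solve_alt input_grid
instance (input_grid : List (List Int)) (out : List (List Int)) : Decidable (Spec_solve input_grid out) := by unfold Spec_solve; infer_instance

-- ===== CLAIM (what is proved, stated in full; the proofs are below) =====
def Claim_equal_solve : Prop := ∀ (input_grid : List (List Int)), Dom_solve input_grid → Pre_solve input_grid → Spec_solve input_grid (solve input_grid)

-- ===== LEMMAS AND PROOFS =====

lemma isFiveA_natCast (g : List (List Int)) (a b : Nat) :
    isFiveA g (a : Int) (b : Int) = true ↔
      a < g.length ∧ b < (g.headD []).length ∧ cellA g a b = 5 := by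
  unfold isFiveA cellA
  simp only [Bool.and_eq_true, decide_eq_true_eq, beq_iff_eq, Int.toNat_natCast]
  constructor
  · rintro ⟨⟨⟨⟨-, h1⟩, -⟩, h2⟩, h3⟩
    exact ⟨by exact_mod_cast h1, by exact_mod_cast h2, h3⟩
  · rintro ⟨h1, h2, h3⟩
    exact ⟨⟨⟨⟨Int.natCast_nonneg a, by exact_mod_cast h1⟩, Int.natCast_nonneg b⟩, by exact_mod_cast h2⟩, h3⟩

lemma isFiveA_neg_left (g : List (List Int)) (x y : Int) (hx : x < 0) :
    isFiveA g x y = false := by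
  unfold isFiveA
  simp [show ¬ (0 : Int) ≤ x by omega]

lemma isFiveA_neg_right (g : List (List Int)) (x y : Int) (hy : y < 0) :
    isFiveA g x y = false := by
  unfold isFiveA
  simp [show ¬ (0 : Int) ≤ y by omega]

lemma blockB_iff (g : List (List Int)) (i j : Nat) :
    blockB g i j = true ↔
      cellA g i j = 5 ∧ cellA g (i+1) j = 5 ∧ cellA g i (j+1) = 5 ∧ cellA g (i+1) (j+1) = 5 := by
  unfold blockB
  simp [Bool.and_eq_true, and_assoc]

-- The value A finally leaves at cell (i, j).
def valA (g : List (List Int)) (i j : Nat) : Int :=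
  if cellA g i j == 5 then
    if (isFiveA g ((i : Int)+1) (j : Int) && isFiveA g (i : Int) ((j : Int)+1) && isFiveA g ((i : Int)+1) ((j : Int)+1)) ||
       (isFiveA g ((i : Int)-1) (j : Int) && isFiveA g (i : Int) ((j : Int)-1) && isFiveA g ((i : Int)-1) ((j : Int)-1)) then 4
    else if isFiveA g ((i : Int)+1) (j : Int) then 3
    else if isFiveA g (i : Int) ((j : Int)+1) then 2
    else 1
  else 0

lemma pv_getD_set_self {α : Type} (l : List α) (i : Nat) (v : α) (d : α) (h : i < l.length) :
    (l.set i v).getD i d = v := by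
  simp [List.getD, h]

lemma pv_getD_set_ne {α : Type} (l : List α) (i k : Nat) (v : α) (d : α) (h : i ≠ k) :
    (l.set i v).getD k d = l.getD k d := by
  simp [List.getD, List.getElem?_set_ne h]

lemma pv_getD_of_le {α : Type} (l : List α) (i : Nat) (d : α) (h : l.length ≤ i) :
    l.getD i d = d := by
  have : l[i]? = none := List.getElem?_eq_none_iff.2 h
  simp [List.getD, this]

lemma pv_set_getD_self {α : Type} (l : List α) (i : Nat) (d : α) (h : i < l.length) :
    l.set i (l.getD i d) = l := by
  rw [List.getD_eq_getElem l d h]; exact List.set_getElem_self ..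

lemma setCellA_setCellA (out : List (List Int)) (i j : Nat) (v w : Int) :
    setCellA (setCellA out i j v) i j w = setCellA out i j w := by
  unfold setCellA
  by_cases h : i < out.length
  · rw [List.set_set, pv_getD_set_self _ _ _ _ h, List.set_set]
  · have h1 : out.set i ((out.getD i []).set j v) = out := List.set_eq_of_length_le (by omega)
    rw [h1]

lemma bodyA_eq (g : List (List Int)) (i j : Nat) (out : List (List Int)) :
    bodyA g i out j = if cellA g i j == 5 then setCellA out i j (valA g i j) else out := by
  unfold bodyA valA
  by_cases h5 : (cellA g i j == 5) = true
  · simp only [h5, if_true]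
    by_cases hb : (isFiveA g ((i : Int)-1) (j : Int) && isFiveA g (i : Int) ((j : Int)-1) && isFiveA g ((i : Int)-1) ((j : Int)-1)) = true
    · simp only [hb, if_true, Bool.or_eq_true, setCellA_setCellA]
      by_cases hf : (isFiveA g ((i : Int)+1) (j : Int) && isFiveA g (i : Int) ((j : Int)+1) && isFiveA g ((i : Int)+1) ((j : Int)+1)) = true
      · simp [hf]
      · simp [hf]
    · by_cases hf : (isFiveA g ((i : Int)+1) (j : Int) && isFiveA g (i : Int) ((j : Int)+1) && isFiveA g ((i : Int)+1) ((j : Int)+1)) = true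
      · simp [hf, hb]
      · simp [hf, hb]
  · simp [h5]

lemma getD_setCellA_self (out : List (List Int)) (i j : Nat) (v : Int) :
    (setCellA out i j v).getD i [] = (out.getD i []).set j v := by
  unfold setCellA
  by_cases h : i < out.length
  · exact pv_getD_set_self _ _ _ _ h
  · rw [List.set_eq_of_length_le (by omega), pv_getD_of_le _ _ _ (by omega)]
    simp

lemma set_setCellA (out : List (List Int)) (i j : Nat) (v : Int) (r : List Int) :
    (setCellA out i j v).set i r = out.set i r := by
  unfold setCellA; rw [List.set_set]

-- the row-level action of A's inner loop
def rowStep (g : List (List Int)) (i : Nat) (r : List Int) (j : Nat) : List Int :=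
  if cellA g i j == 5 then r.set j (valA g i j) else r

lemma inner_eq (g : List (List Int)) (i : Nat) :
    ∀ (js : List Nat) (out : List (List Int)),
      js.foldl (bodyA g i) out = out.set i (js.foldl (rowStep g i) (out.getD i [])) := by
  intro js
  induction js with
  | nil =>
    intro out
    simp only [List.foldl_nil]
    by_cases h : i < out.length
    · rw [pv_set_getD_self _ _ _ h]
    · rw [List.set_eq_of_length_le (by omega)]
  | cons j rest ih =>
    intro out
    simp only [List.foldl_cons]
    rw [ih, bodyA_eq]
    by_cases h5 : (cellA g i j == 5) = true
    · simp only [h5, if_true]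
      rw [getD_setCellA_self, set_setCellA]
      unfold rowStep
      simp only [h5, if_true]
    · simp [rowStep, h5]

lemma rowfold_length (g : List (List Int)) (i : Nat) :
    ∀ (js : List Nat) (r : List Int), (js.foldl (rowStep g i) r).length = r.length := by
  intro js
  induction js with
  | nil => intro r; rfl
  | cons j rest ih =>
    intro r
    simp only [List.foldl_cons, ih]
    unfold rowStep
    by_cases h : (cellA g i j == 5) = true <;> simp [h]

lemma rowfold_getD (g : List (List Int)) (i : Nat) :
    ∀ (js : List Nat) (r : List Int) (k : Nat),
      (js.foldl (rowStep g i) r).getD k 0 =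
        if k ∈ js ∧ (cellA g i k == 5) = true ∧ k < r.length then valA g i k else r.getD k 0 := by
  intro js
  induction js with
  | nil => intro r k; simp
  | cons j rest ih =>
    intro r k
    simp only [List.foldl_cons, ih, List.mem_cons]
    have hlen : (rowStep g i r j).length = r.length := by
      unfold rowStep; by_cases h : (cellA g i j == 5) = true <;> simp [h]
    rw [hlen]
    by_cases hk : k < r.length
    · by_cases h5k : (cellA g i k == 5) = true
      · by_cases hmem : k ∈ rest
        · simp [hmem, h5k, hk]
        · simp only [hmem, h5k, hk, and_true, or_false]
          by_cases hkj : k = j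
          · subst hkj
            simp only [if_true]
            unfold rowStep
            simp only [h5k, if_true]
            exact pv_getD_set_self _ _ _ _ hk
          · simp only [hkj]
            unfold rowStep
            by_cases h5j : (cellA g i j == 5) = true
            · simp only [h5j, if_true]
              exact pv_getD_set_ne _ _ _ _ _ (fun h => hkj h.symm)
            · simp [h5j]
      · have hcond : ¬ ((k = j ∨ k ∈ rest) ∧ (cellA g i k == 5) = true ∧ k < r.length) := by
          intro h; exact h5k h.2.1
        have hcond2 : ¬ (k ∈ rest ∧ (cellA g i k == 5) = true ∧ k < r.length) := by
          intro h; exact h5k h.2.1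
        simp only [hcond, hcond2, if_false]
        unfold rowStep
        by_cases h5j : (cellA g i j == 5) = true
        · simp only [h5j, if_true]
          by_cases hkj : k = j
          · subst hkj; exact absurd h5j h5k
          · exact pv_getD_set_ne _ _ _ _ _ (fun h => hkj h.symm)
        · simp [h5j]
    · have hcond : ¬ ((k = j ∨ k ∈ rest) ∧ (cellA g i k == 5) = true ∧ k < r.length) := by
        intro h; exact hk h.2.2
      have hcond2 : ¬ (k ∈ rest ∧ (cellA g i k == 5) = true ∧ k < r.length) := by
        intro h; exact hk h.2.2
      simp only [hcond, hcond2, if_false]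
      unfold rowStep
      by_cases h5j : (cellA g i j == 5) = true
      · simp only [h5j, if_true]
        rw [pv_getD_of_le _ _ _ (by simp; omega), pv_getD_of_le _ _ _ (by omega)]
      · simp [h5j]

lemma outer_length (T : Nat → List Int → List Int) :
    ∀ (is : List Nat) (out : List (List Int)),
      (is.foldl (fun out i => out.set i (T i (out.getD i []))) out).length = out.length := by
  intro is
  induction is with
  | nil => intro out; rfl
  | cons i rest ih =>
    intro out
    simp only [List.foldl_cons]
    rw [ih]
    simp

lemma outer_getD (T : Nat → List Int → List Int) :
    ∀ (is : List Nat), is.Nodup → ∀ (out : List (List Int)) (k : Nat),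
      (is.foldl (fun out i => out.set i (T i (out.getD i []))) out).getD k [] =
        if k ∈ is ∧ k < out.length then T k (out.getD k []) else out.getD k [] := by
  intro is
  induction is with
  | nil => intro _ out k; simp
  | cons i rest ih =>
    intro hnd out k
    have hni : i ∉ rest := (List.nodup_cons.1 hnd).1
    have hnd' : rest.Nodup := (List.nodup_cons.1 hnd).2
    simp only [List.foldl_cons, ih hnd', List.mem_cons, List.length_set]
    by_cases hk : k < out.length
    · by_cases hki : k = i
      · subst hki
        have hmem : k ∉ rest := hni
        simp only [hmem, true_or, hk, and_true, if_true, if_false]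
        exact pv_getD_set_self _ _ _ _ hk
      · have hset : (out.set i (T i (out.getD i []))).getD k [] = out.getD k [] :=
          pv_getD_set_ne _ _ _ _ _ (fun h => hki h.symm)
        rw [hset]
        by_cases hmem : k ∈ rest
        · simp [hmem, hk]
        · simp [hmem, hki, hk]
    · have h1 : ¬ (k ∈ rest ∧ k < out.length) := fun h => hk h.2
      have h2 : ¬ ((k = i ∨ k ∈ rest) ∧ k < out.length) := fun h => hk h.2
      simp only [h1, h2, if_false]
      by_cases hki : k = i
      · subst hki
        rw [pv_getD_of_le _ _ _ (by simp; omega), pv_getD_of_le _ _ _ (by omega)]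
      · exact pv_getD_set_ne _ _ _ _ _ (fun h => hki h.symm)

-- membership in the set B builds
lemma mem_addfold (g : List (List Int)) (i : Nat) :
    ∀ (js : List Nat) (s : PySem.Set (Nat × Nat)) (x : Nat × Nat),
      x ∈ js.foldl (addBlock g i) s ↔
        x ∈ s ∨ ∃ j ∈ js, blockB g i j = true ∧ (x = (i, j) ∨ x = (i+1, j+1)) := by
  intro js
  induction js with
  | nil => intro s x; simp
  | cons j rest ih =>
    intro s x
    simp only [List.foldl_cons, ih, List.mem_cons]
    unfold addBlock
    by_cases hb : blockB g i j = true
    · simp only [hb, if_true, PySem.Set.mem_add]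
      constructor
      · rintro (((h | h) | h) | ⟨j', hj', hb', hx⟩)
        · exact Or.inl h
        · exact Or.inr ⟨j, Or.inl rfl, hb, Or.inl h⟩
        · exact Or.inr ⟨j, Or.inl rfl, hb, Or.inr h⟩
        · exact Or.inr ⟨j', Or.inr hj', hb', hx⟩
      · rintro (h | ⟨j', hj' | hj', hb', hx | hx⟩)
        · exact Or.inl (Or.inl (Or.inl h))
        · subst hj'; exact Or.inl (Or.inl (Or.inr hx))
        · subst hj'; exact Or.inl (Or.inr hx)
        · exact Or.inr ⟨j', hj', hb', Or.inl hx⟩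
        · exact Or.inr ⟨j', hj', hb', Or.inr hx⟩
    · simp only [hb]
      constructor
      · rintro (h | ⟨j', hj', hb', hx⟩)
        · exact Or.inl h
        · exact Or.inr ⟨j', Or.inr hj', hb', hx⟩
      · rintro (h | ⟨j', hj' | hj', hb', hx⟩)
        · exact Or.inl h
        · subst hj'; exact absurd hb' hb
        · exact Or.inr ⟨j', hj', hb', hx⟩

lemma mem_fourB (g : List (List Int)) (x : Nat × Nat) :
    x ∈ fourB g ↔
      ∃ i j, i + 1 < g.length ∧ j + 1 < (g.headD []).length ∧ blockB g i j = true ∧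
        (x = (i, j) ∨ x = (i+1, j+1)) := by
  unfold fourB
  have houter : ∀ (is : List Nat) (s : PySem.Set (Nat × Nat)),
      x ∈ is.foldl (fun s i => (List.range ((g.headD []).length - 1)).foldl (addBlock g i) s) s ↔
        x ∈ s ∨ ∃ i ∈ is, ∃ j ∈ List.range ((g.headD []).length - 1),
          blockB g i j = true ∧ (x = (i, j) ∨ x = (i+1, j+1)) := by
    intro is
    induction is with
    | nil => intro s; simp
    | cons i rest ih =>
      intro s
      simp only [List.foldl_cons, ih, mem_addfold, List.mem_cons]
      constructor
      · rintro ((h | ⟨j, hj, hb, hx⟩) | ⟨i', hi', hrest⟩)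
        · exact Or.inl h
        · exact Or.inr ⟨i, Or.inl rfl, j, hj, hb, hx⟩
        · exact Or.inr ⟨i', Or.inr hi', hrest⟩
      · rintro (h | ⟨i', hi' | hi', hrest⟩)
        · exact Or.inl (Or.inl h)
        · subst hi'; exact Or.inl (Or.inr hrest)
        · exact Or.inr ⟨i', hi', hrest⟩
  rw [houter]
  simp only [PySem.Set.empty, List.not_mem_nil, false_or, List.mem_range]
  constructor
  · rintro ⟨i, hi, j, hj, hb, hx⟩
    exact ⟨i, j, by omega, by omega, hb, hx⟩
  · rintro ⟨i, j, hi, hj, hb, hx⟩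
    exact ⟨i, by omega, j, by omega, hb, hx⟩

lemma val_eq_code (g : List (List Int)) (k m : Nat) (hk : k < g.length)
    (hm : m < (g.headD []).length) : valA g k m = codeB g (fourB g) k m := by
  have hfwd : (isFiveA g ((k : Int)+1) (m : Int) && isFiveA g (k : Int) ((m : Int)+1) &&
      isFiveA g ((k : Int)+1) ((m : Int)+1)) = true ↔
      (k+1 < g.length ∧ m+1 < (g.headD []).length ∧ cellA g (k+1) m = 5 ∧
        cellA g k (m+1) = 5 ∧ cellA g (k+1) (m+1) = 5) := by
    have e1 : (k : Int) + 1 = ((k+1 : Nat) : Int) := by push_cast; ring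
    have e2 : (m : Int) + 1 = ((m+1 : Nat) : Int) := by push_cast; ring
    rw [e1, e2]
    simp only [Bool.and_eq_true, isFiveA_natCast]
    constructor
    · rintro ⟨⟨⟨h1, -, h2⟩, -, h3, h4⟩, h5', h6, h7⟩
      exact ⟨h1, h6, h2, h4, h7⟩
    · rintro ⟨h1, h2, h3, h4, h5'⟩
      exact ⟨⟨⟨h1, hm, h3⟩, hk, h2, h4⟩, h1, h2, h5'⟩
  have hbwd : (isFiveA g ((k : Int)-1) (m : Int) && isFiveA g (k : Int) ((m : Int)-1) &&
      isFiveA g ((k : Int)-1) ((m : Int)-1)) = true ↔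
      (1 ≤ k ∧ 1 ≤ m ∧ cellA g (k-1) m = 5 ∧ cellA g k (m-1) = 5 ∧ cellA g (k-1) (m-1) = 5) := by
    by_cases hk0 : k = 0
    · subst hk0
      rw [isFiveA_neg_left g _ _ (by omega)]
      simp
    · by_cases hm0 : m = 0
      · subst hm0
        rw [isFiveA_neg_right g (k : Int) _ (by omega)]
        simp
      · have e1 : (k : Int) - 1 = ((k-1 : Nat) : Int) := by omega
        have e2 : (m : Int) - 1 = ((m-1 : Nat) : Int) := by omega
        rw [e1, e2]
        simp only [Bool.and_eq_true, isFiveA_natCast]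
        constructor
        · rintro ⟨⟨⟨-, -, h2⟩, -, -, h4⟩, -, -, h7⟩
          exact ⟨by omega, by omega, h2, h4, h7⟩
        · rintro ⟨h1, h2, h3, h4, h5'⟩
          exact ⟨⟨⟨by omega, hm, h3⟩, hk, by omega, h4⟩, by omega, by omega, h5'⟩
  by_cases h5 : (cellA g k m == 5) = true
  · have hmem : (k, m) ∈ fourB g ↔
        ((k+1 < g.length ∧ m+1 < (g.headD []).length ∧ cellA g (k+1) m = 5 ∧
          cellA g k (m+1) = 5 ∧ cellA g (k+1) (m+1) = 5) ∨
         (1 ≤ k ∧ 1 ≤ m ∧ cellA g (k-1) m = 5 ∧ cellA g k (m-1) = 5 ∧ cellA g (k-1) (m-1) = 5)) := by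
      rw [mem_fourB]
      constructor
      · rintro ⟨i, j, hi, hj, hb, hx | hx⟩
        · injection hx with hx1 hx2
          subst hx1; subst hx2
          obtain ⟨c1, c2, c3, c4⟩ := blockB_iff g k m |>.1 hb
          exact Or.inl ⟨hi, hj, c2, c3, c4⟩
        · injection hx with hx1 hx2
          subst hx1; subst hx2
          obtain ⟨c1, c2, c3, c4⟩ := blockB_iff g i j |>.1 hb
          refine Or.inr ⟨by omega, by omega, ?_, ?_, ?_⟩
          · simpa only [Nat.add_sub_cancel] using c3
          · simpa only [Nat.add_sub_cancel] using c2
          · simpa only [Nat.add_sub_cancel] using c1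
      · rintro (⟨h1, h2, h3, h4, h5'⟩ | ⟨h1, h2, h3, h4, h5'⟩)
        · exact ⟨k, m, h1, h2,
            (blockB_iff g k m).2 ⟨beq_iff_eq.1 h5, h3, h4, h5'⟩, Or.inl rfl⟩
        · have ek : k - 1 + 1 = k := Nat.sub_add_cancel h1
          have em : m - 1 + 1 = m := Nat.sub_add_cancel h2
          refine ⟨k-1, m-1, by omega, by omega, (blockB_iff g (k-1) (m-1)).2 ?_, Or.inr ?_⟩
          · refine ⟨h5', ?_, ?_, ?_⟩
            · rw [ek]; exact h4
            · rw [em]; exact h3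
            · rw [ek, em]; exact beq_iff_eq.1 h5
          · rw [ek, em]
    unfold valA codeB
    simp only [h5, if_true, Bool.not_true, Bool.false_eq_true, if_false]
    by_cases hOr : ((k+1 < g.length ∧ m+1 < (g.headD []).length ∧ cellA g (k+1) m = 5 ∧
          cellA g k (m+1) = 5 ∧ cellA g (k+1) (m+1) = 5) ∨
        (1 ≤ k ∧ 1 ≤ m ∧ cellA g (k-1) m = 5 ∧ cellA g k (m-1) = 5 ∧ cellA g (k-1) (m-1) = 5))
    · have hcont : PySem.Set.contains (fourB g) (k, m) = true :=
        (PySem.Set.contains_iff _ _).2 (hmem.2 hOr)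
      have hforb : (isFiveA g ((k : Int)+1) (m : Int) && isFiveA g (k : Int) ((m : Int)+1) &&
          isFiveA g ((k : Int)+1) ((m : Int)+1) ||
          (isFiveA g ((k : Int)-1) (m : Int) && isFiveA g (k : Int) ((m : Int)-1) &&
          isFiveA g ((k : Int)-1) ((m : Int)-1))) = true := by
        rw [Bool.or_eq_true]
        exact hOr.imp hfwd.2 hbwd.2
      rw [hcont, hforb]
      simp
    · have hcont : PySem.Set.contains (fourB g) (k, m) = false :=
        eq_false_of_ne_true (fun h => hOr (hmem.1 ((PySem.Set.contains_iff _ _).1 h)))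
      have hforb : (isFiveA g ((k : Int)+1) (m : Int) && isFiveA g (k : Int) ((m : Int)+1) &&
          isFiveA g ((k : Int)+1) ((m : Int)+1) ||
          (isFiveA g ((k : Int)-1) (m : Int) && isFiveA g (k : Int) ((m : Int)-1) &&
          isFiveA g ((k : Int)-1) ((m : Int)-1))) = false := by
        rw [Bool.or_eq_false_iff]
        constructor
        · exact eq_false_of_ne_true (fun h => hOr (Or.inl (hfwd.1 h)))
        · exact eq_false_of_ne_true (fun h => hOr (Or.inr (hbwd.1 h)))
      have h3 : isFiveA g ((k : Int)+1) (m : Int) =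
          (decide (k+1 < g.length) && (cellA g (k+1) m == 5)) := by
        rw [Bool.eq_iff_iff]
        have e1 : (k : Int) + 1 = ((k+1 : Nat) : Int) := by push_cast; ring
        rw [e1, isFiveA_natCast]
        simp only [Bool.and_eq_true, decide_eq_true_eq, beq_iff_eq]
        exact ⟨fun ⟨a, b, c⟩ => ⟨a, c⟩, fun ⟨a, c⟩ => ⟨a, hm, c⟩⟩
      have h2 : isFiveA g (k : Int) ((m : Int)+1) =
          (decide (m+1 < (g.headD []).length) && (cellA g k (m+1) == 5)) := by
        rw [Bool.eq_iff_iff]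
        have e2 : (m : Int) + 1 = ((m+1 : Nat) : Int) := by push_cast; ring
        rw [e2, isFiveA_natCast]
        simp only [Bool.and_eq_true, decide_eq_true_eq, beq_iff_eq]
        exact ⟨fun ⟨a, b, c⟩ => ⟨b, c⟩, fun ⟨b, c⟩ => ⟨hk, b, c⟩⟩
      rw [hcont, hforb, h3, h2]
  · unfold valA codeB
    simp [h5]

-- ===== VERDICT (by name: the statement is the Claim_ definition above) =====
theorem solve_spec : Claim_equal_solve := by
  intro g hdom hpre
  unfold Spec_solve solve solve_alt
  show (List.range g.length).foldl
      (fun out i => (List.range (g.headD []).length).foldl (bodyA g i) out)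
      ((List.range g.length).map fun _ => (List.range (g.headD []).length).map fun _ => (0 : Int))
    = (List.range g.length).map (fun i =>
        (List.range (g.headD []).length).map (fun j => codeB g (fourB g) i j))
  have hfun : (fun (out : List (List Int)) (i : Nat) =>
        (List.range (g.headD []).length).foldl (bodyA g i) out)
      = fun out i => out.set i
          ((List.range (g.headD []).length).foldl (rowStep g i) (out.getD i [])) := by
    funext out i
    exact inner_eq g i _ out
  rw [hfun]
  have hlen : ((List.range g.length).foldl
      (fun out i => out.set i
        ((List.range (g.headD []).length).foldl (rowStep g i) (out.getD i [])))
      ((List.range g.length).map fun _ =>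
        (List.range (g.headD []).length).map fun _ => (0 : Int))).length = g.length :=
    (outer_length (fun i r => (List.range (g.headD []).length).foldl (rowStep g i) r)
      (List.range g.length) _).trans (by simp)
  apply List.ext_getElem
  · rw [hlen]; simp
  · intro k h1 h2
    have hk : k < g.length := by rwa [hlen] at h1
    have hrow : ((List.range g.length).foldl
        (fun out i => out.set i
          ((List.range (g.headD []).length).foldl (rowStep g i) (out.getD i [])))
        ((List.range g.length).map fun _ =>
          (List.range (g.headD []).length).map fun _ => (0 : Int))).getD k [] =
        (List.range (g.headD []).length).foldl (rowStep g k)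
          ((List.range (g.headD []).length).map fun _ => (0 : Int)) := by
      refine (outer_getD (fun i r => (List.range (g.headD []).length).foldl (rowStep g i) r)
        (List.range g.length) List.nodup_range _ k).trans ?_
      have hcond : k ∈ List.range g.length ∧ k < ((List.range g.length).map fun _ =>
          (List.range (g.headD []).length).map fun _ => (0 : Int)).length :=
        ⟨by simpa using hk, by simpa using hk⟩
      rw [if_pos hcond]
      have hinit : (((List.range g.length).map fun _ =>
          (List.range (g.headD []).length).map fun _ => (0 : Int)).getD k []) =
          (List.range (g.headD []).length).map fun _ => (0 : Int) := by
        rw [List.getD_eq_getElem _ [] (by simpa using hk)]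
        simp
      rw [hinit]
    rw [← List.getD_eq_getElem _ [] h1, hrow, List.getElem_map]
    simp only [List.getElem_range]
    apply List.ext_getElem
    · rw [rowfold_length]; simp
    · intro m hm1 hm2
      have hm : m < (g.headD []).length := by
        rw [rowfold_length] at hm1
        simpa using hm1
      have hrowm : ((List.range (g.headD []).length).foldl (rowStep g k)
          ((List.range (g.headD []).length).map fun _ => (0 : Int))).getD m 0 = valA g k m := by
        refine (rowfold_getD g k (List.range (g.headD []).length) _ m).trans ?_
        have hzero : (((List.range (g.headD []).length).map fun _ => (0 : Int)).getD m 0) = 0 := by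
          rw [List.getD_eq_getElem _ 0 (by simpa using hm)]
          simp
        by_cases h5 : (cellA g k m == 5) = true
        · rw [if_pos ⟨by simpa using hm, h5, by simpa using hm⟩]
        · rw [if_neg (fun h => h5 h.2.1), hzero]
          unfold valA
          rw [if_neg h5]
      rw [← List.getD_eq_getElem _ 0 hm1, hrowm, val_eq_code g k m hk hm, List.getElem_map,
        List.getElem_range]
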